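-- pv_equiv track=rewrite | github.com/zzangw00/problem-solving | 프로그래머스/1단계/키패드 누르기.py | solution
-- ===== SOURCE A (Python) =====
-- def solution(numbers, hand):
--     answer = []
--     leftHand = '*'
--     rightHand = '#'
--     left = [1, 4, 7, '*']
--     right = [3, 6, 9, '#']
--     center = [2, 5, 8, 0]
--     for i in range(len(numbers)):
--         if numbers[i] in left:
--             answer.append('L')
--             leftHand = numbers[i]
--             continue
--         if numbers[i] in right:
--             answer.append('R')
--             rightHand = numbers[i]
--             continue
--         else:
--             if leftHand not in center:
--                 leftR = center.index(numbers[i]) - left.index(leftHand)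
--                 if leftR < 0:
--                     leftR = -leftR
--                 leftR += 1
--             else:
--                 leftR = center.index(numbers[i]) - center.index(leftHand)
--                 if leftR < 0:
--                     leftR = -leftR
--             if rightHand not in center:
--                 rightR = center.index(numbers[i]) - right.index(rightHand)
--                 if rightR < 0:
--                     rightR = -rightR
--                 rightR += 1
--             else:
--                 rightR = center.index(numbers[i]) - center.index(rightHand)
--                 if rightR < 0:
--                     rightR = -rightR
--
--             if leftR > rightR:
--                 answer.append('R')
--                 rightHand = numbers[i]
--                 continue
--             if leftR < rightR:
--                 answer.append('L')
--                 leftHand = numbers[i]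
--                 continue
--             else:
--                 if hand == 'right':
--                     answer.append('R')
--                     rightHand = numbers[i]
--                     continue
--                 else:
--                     answer.append('L')
--                     leftHand = numbers[i]
--                     continue
--     result = ''.join(answer)
--     return result
-- ===== SOURCE B (Python) =====
-- def solution(numbers, hand):
--     # Precompute a transition table (a small DFA): for every reachable pair of
--     # hand positions and every digit, the pressed letter and the next state.
--     # The main loop is then pure table lookup.
--     pos = {1: (0, 0), 2: (0, 1), 3: (0, 2),
--            4: (1, 0), 5: (1, 1), 6: (1, 2),
--            7: (2, 0), 8: (2, 1), 9: (2, 2),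
--            '*': (3, 0), 0: (3, 1), '#': (3, 2)}
--     lkeys = ['*', 1, 4, 7, 0, 2, 5, 8]
--     rkeys = ['#', 3, 6, 9, 0, 2, 5, 8]
--     trans = {}
--     for lh in lkeys:
--         for rh in rkeys:
--             for d in range(10):
--                 r, c = pos[d]
--                 if c == 0:
--                     trans[lh, rh, d] = ('L', d, rh)
--                 elif c == 2:
--                     trans[lh, rh, d] = ('R', lh, d)
--                 else:
--                     lr, lc = pos[lh]
--                     rr, rc = pos[rh]
--                     dl = abs(lr - r) + abs(lc - c)
--                     dr = abs(rr - r) + abs(rc - c)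
--                     if dl < dr or (dl == dr and hand != 'right'):
--                         trans[lh, rh, d] = ('L', d, rh)
--                     else:
--                         trans[lh, rh, d] = ('R', lh, d)
--     out = []
--     lh, rh = '*', '#'
--     for n in numbers:
--         ch, lh, rh = trans[lh, rh, n]
--         out.append(ch)
--     return ''.join(out)
-- ===== Notes on version B (the rewrite author's own statement) =====
-- stated objective: alternative
-- what changed: B precomputes a finite transition table (a DFA over the 8x8 reachable hand-position pairs x 10 digits, keyed in a dict) from a coordinate grid and Manhattan distance, so its main loop over numbers is pure table lookup with no per-step branch/distance computation, unlike A's per-step column-list index arithmetic.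
import Mathlib
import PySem

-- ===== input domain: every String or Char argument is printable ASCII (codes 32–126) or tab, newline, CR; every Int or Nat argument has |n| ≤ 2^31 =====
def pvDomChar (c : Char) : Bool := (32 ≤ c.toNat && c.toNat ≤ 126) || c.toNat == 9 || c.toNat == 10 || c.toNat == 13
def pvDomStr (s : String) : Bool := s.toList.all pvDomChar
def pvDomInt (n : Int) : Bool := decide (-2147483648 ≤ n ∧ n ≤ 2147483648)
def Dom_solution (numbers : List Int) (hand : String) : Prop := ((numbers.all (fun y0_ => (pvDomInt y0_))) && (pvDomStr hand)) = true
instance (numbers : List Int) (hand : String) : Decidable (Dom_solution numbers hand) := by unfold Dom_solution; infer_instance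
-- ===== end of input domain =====

-- B precomputes a transition table (a small DFA over hand states × digits) once,
-- so its main loop is pure table lookup (objective: alternative; same O(n) cost).

-- ===== PORT A =====
-- Python keypad values are ints mixed with the strings '*' and '#'; PadKey models that union.
inductive PadKey
  | num : Int → PadKey
  | star : PadKey
  | hash : PadKey
deriving DecidableEq, Repr

def leftL : List PadKey := [.num 1, .num 4, .num 7, .star]
def rightL : List PadKey := [.num 3, .num 6, .num 9, .hash]
def centerL : List PadKey := [.num 2, .num 5, .num 8, .num 0]

-- list.index; '.getD 0' never fires under Pre_solution (Python's ValueError is excluded there)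
def aIdx (xs : List PadKey) (k : PadKey) : Int := (((PySem.List.index? xs k).getD 0 : Nat) : Int)

-- the body of A's for-loop: pressed letter and updated (leftHand, rightHand); tieR = (hand == 'right')
def aStep (n : Int) (tieR : Bool) (lh rh : PadKey) : Char × PadKey × PadKey :=
  if leftL.contains (PadKey.num n) then ('L', PadKey.num n, rh)
  else if rightL.contains (PadKey.num n) then ('R', lh, PadKey.num n)
  else
    let leftR :=
      if ¬ centerL.contains lh then
        let d := aIdx centerL (PadKey.num n) - aIdx leftL lh
        (if d < 0 then -d else d) + 1
      else
        let d := aIdx centerL (PadKey.num n) - aIdx centerL lh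
        if d < 0 then -d else d
    let rightR :=
      if ¬ centerL.contains rh then
        let d := aIdx centerL (PadKey.num n) - aIdx rightL rh
        (if d < 0 then -d else d) + 1
      else
        let d := aIdx centerL (PadKey.num n) - aIdx centerL rh
        if d < 0 then -d else d
    if leftR > rightR then ('R', lh, PadKey.num n)
    else if leftR < rightR then ('L', PadKey.num n, rh)
    else if tieR then ('R', lh, PadKey.num n)
    else ('L', PadKey.num n, rh)

def solGo : List Int → Bool → List Char → PadKey → PadKey → List Char
  | [], _, ans, _, _ => ans
  | n :: rest, tieR, ans, lh, rh =>
    match aStep n tieR lh rh with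
    | (c, lh', rh') => solGo rest tieR (ans ++ [c]) lh' rh'

def solution (numbers : List Int) (hand : String) : String :=
  String.mk (solGo numbers (hand == "right") [] PadKey.star PadKey.hash)

-- ===== PORT B =====
def posB : PySem.Dict PadKey (Int × Int) :=
  PySem.Dict.ofList
    [(.num 1, (0, 0)), (.num 2, (0, 1)), (.num 3, (0, 2)),
     (.num 4, (1, 0)), (.num 5, (1, 1)), (.num 6, (1, 2)),
     (.num 7, (2, 0)), (.num 8, (2, 1)), (.num 9, (2, 2)),
     (.star, (3, 0)), (.num 0, (3, 1)), (.hash, (3, 2))]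

def lkeys : List PadKey := [.star, .num 1, .num 4, .num 7, .num 0, .num 2, .num 5, .num 8]
def rkeys : List PadKey := [.hash, .num 3, .num 6, .num 9, .num 0, .num 2, .num 5, .num 8]

-- pos[k]; '.getD (0,0)' never fires: all keys looked up are in posB
def posOf (k : PadKey) : Int × Int := (PySem.Dict.get? posB k).getD (0, 0)

-- one entry of the table: the value Source B stores at trans[lh, rh, d]
def transVal (tieR : Bool) (lh rh : PadKey) (d : Int) : Char × PadKey × PadKey :=
  let rc := posOf (.num d)
  if rc.2 == 0 then ('L', .num d, rh)
  else if rc.2 == 2 then ('R', lh, .num d)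
  else
    let l := posOf lh
    let r := posOf rh
    let dl := |l.1 - rc.1| + |l.2 - rc.2|
    let dr := |r.1 - rc.1| + |r.2 - rc.2|
    if dl < dr || (dl == dr && !tieR) then ('L', .num d, rh)
    else ('R', lh, .num d)

-- Source B's triple nested build loop over lkeys × rkeys × range(10)
def buildTrans (tieR : Bool) : PySem.Dict (PadKey × PadKey × Int) (Char × PadKey × PadKey) :=
  lkeys.foldl (fun t lh =>
    rkeys.foldl (fun t rh =>
      (PySem.List.pyRange 0 10 1).foldl (fun t d =>
        PySem.Dict.insert t (lh, rh, d) (transVal tieR lh rh d)) t) t)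
    (PySem.Dict.ofList [])

-- Source B's main loop: pure table lookup; '.getD' never fires under Pre_solution (KeyError excluded)
def runGo (t : PySem.Dict (PadKey × PadKey × Int) (Char × PadKey × PadKey)) :
    List Int → List Char → PadKey → PadKey → List Char
  | [], out, _, _ => out
  | n :: rest, out, lh, rh =>
    match (PySem.Dict.get? t (lh, rh, n)).getD ('L', lh, rh) with
    | (c, lh', rh') => runGo t rest (out ++ [c]) lh' rh'

def solution_alt (numbers : List Int) (hand : String) : String :=
  String.mk (runGo (buildTrans (hand == "right")) numbers [] PadKey.star PadKey.hash)

-- ===== PRECONDITION & SPEC =====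
-- Pre_ excludes numbers outside 0..9: there A raises ValueError (center.index) and B raises KeyError.
def Pre_solution (numbers : List Int) (hand : String) : Prop :=
  ∀ n ∈ numbers, 0 ≤ n ∧ n ≤ 9
instance (numbers : List Int) (hand : String) : Decidable (Pre_solution numbers hand) := by unfold Pre_solution; infer_instance
def pvWitness_solution : List Int × String := ([1, 3, 4, 5, 8, 2, 1, 4, 5, 9, 5], "right")

def Spec_solution (numbers : List Int) (hand : String) (out : String) : Prop := out = solution_alt numbers hand
instance (numbers : List Int) (hand : String) (out : String) : Decidable (Spec_solution numbers hand out) := by unfold Spec_solution; infer_instance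

-- ===== CLAIM (what is proved, stated in full; the proofs are below) =====
def Claim_equal_solution : Prop := ∀ (numbers : List Int) (hand : String), Dom_solution numbers hand → Pre_solution numbers hand → Spec_solution numbers hand (solution numbers hand)

-- ===== LEMMAS AND PROOFS =====
def digitsL : List Int := [0, 1, 2, 3, 4, 5, 6, 7, 8, 9]

lemma mem_digitsL {n : Int} (h0 : 0 ≤ n) (h9 : n ≤ 9) : n ∈ digitsL := by
  simp only [digitsL, List.mem_cons, List.not_mem_nil, or_false]
  omega

-- the build loop's keys, flattened
def triplesL : List (PadKey × PadKey × Int) :=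
  lkeys.flatMap (fun lh => rkeys.flatMap (fun rh => digitsL.map (fun d => (lh, rh, d))))

def transValK (tieR : Bool) (k : PadKey × PadKey × Int) : Char × PadKey × PadKey :=
  transVal tieR k.1 k.2.1 k.2.2

lemma foldl_flatMap' {α β γ : Type} (g : β → γ → β) (f : α → List γ) :
    ∀ (l : List α) (init : β),
    ((l.flatMap f).foldl g init) = l.foldl (fun b a => (f a).foldl g b) init := by
  intro l
  induction l with
  | nil => intro init; rfl
  | cons x xs ih =>
    intro init
    simp only [List.flatMap_cons, List.foldl_append, List.foldl_cons]
    exact ih _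

lemma build_eq_flat (tieR : Bool) :
    buildTrans tieR =
      triplesL.foldl (fun t k => PySem.Dict.insert t k (transValK tieR k)) (PySem.Dict.ofList []) := by
  have hr : PySem.List.pyRange 0 10 1 = digitsL := by decide
  unfold buildTrans triplesL
  rw [hr]
  simp only [foldl_flatMap', List.foldl_map, transValK]

lemma get?_foldl_insertF_not_mem {κ ν : Type} [BEq κ] [LawfulBEq κ] (f : κ → ν) :
    ∀ (ks : List κ) (t : PySem.Dict κ ν) (k : κ), k ∉ ks →
    (ks.foldl (fun t k' => PySem.Dict.insert t k' (f k')) t).get? k = t.get? k := by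
  intro ks
  induction ks with
  | nil => intro t k _; rfl
  | cons k1 rest ih =>
    intro t k hk
    have hne : k ≠ k1 := fun h => hk (h ▸ List.mem_cons_self ..)
    simp only [List.foldl_cons]
    rw [ih _ k (fun h => hk (List.mem_cons_of_mem _ h)),
        PySem.Dict.get?_insert_of_ne _ _ hne]

lemma get?_foldl_insertF_mem {κ ν : Type} [BEq κ] [LawfulBEq κ] (f : κ → ν) :
    ∀ (ks : List κ) (t : PySem.Dict κ ν) (k : κ), k ∈ ks →
    (ks.foldl (fun t k' => PySem.Dict.insert t k' (f k')) t).get? k = some (f k) := by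
  intro ks
  induction ks with
  | nil => intro t k h; cases h
  | cons k1 rest ih =>
    intro t k hk
    by_cases hmem : k ∈ rest
    · exact ih _ k hmem
    · have hk1 : k = k1 := by
        rcases List.mem_cons.mp hk with h | h
        · exact h
        · exact absurd h hmem
      subst hk1
      simp only [List.foldl_cons]
      rw [get?_foldl_insertF_not_mem f rest _ k hmem, PySem.Dict.get?_insert_self]

lemma mem_triplesL {lh rh : PadKey} {d : Int}
    (hl : lh ∈ lkeys) (hr : rh ∈ rkeys) (hd : d ∈ digitsL) : (lh, rh, d) ∈ triplesL := by
  unfold triplesL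
  rw [List.mem_flatMap]
  refine ⟨lh, hl, ?_⟩
  rw [List.mem_flatMap]
  refine ⟨rh, hr, ?_⟩
  rw [List.mem_map]
  exact ⟨d, hd, rfl⟩

lemma get?_build {tieR : Bool} {lh rh : PadKey} {d : Int}
    (hl : lh ∈ lkeys) (hr : rh ∈ rkeys) (hd : d ∈ digitsL) :
    PySem.Dict.get? (buildTrans tieR) (lh, rh, d) = some (transVal tieR lh rh d) := by
  rw [build_eq_flat]
  exact get?_foldl_insertF_mem (transValK tieR) triplesL _ _ (mem_triplesL hl hr hd)

-- finite core fact: on reachable states and digits the stored table value is A's step,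
-- and the new hands stay reachable
lemma step_eq : ∀ d ∈ digitsL, ∀ tieR : Bool, ∀ lh ∈ lkeys, ∀ rh ∈ rkeys,
    transVal tieR lh rh d = aStep d tieR lh rh ∧
    (aStep d tieR lh rh).2.1 ∈ lkeys ∧ (aStep d tieR lh rh).2.2 ∈ rkeys := by
  decide

lemma go_eq (tieR : Bool) (t : PySem.Dict (PadKey × PadKey × Int) (Char × PadKey × PadKey))
    (hT : ∀ d ∈ digitsL, ∀ lh ∈ lkeys, ∀ rh ∈ rkeys,
      t.get? (lh, rh, d) = some (transVal tieR lh rh d)) :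
    ∀ (ns : List Int) (ans : List Char) (lh rh : PadKey),
    (∀ n ∈ ns, 0 ≤ n ∧ n ≤ 9) → lh ∈ lkeys → rh ∈ rkeys →
    solGo ns tieR ans lh rh = runGo t ns ans lh rh := by
  intro ns
  induction ns with
  | nil => intro _ _ _ _ _ _; rfl
  | cons n rest ih =>
    intro ans lh rh hpre hl hr
    have hn := hpre n (List.mem_cons_self ..)
    have hd := mem_digitsL hn.1 hn.2
    obtain ⟨h1, h2, h3⟩ := step_eq n hd tieR lh hl rh hr
    have hlook := hT n hd lh hl rh hr
    rw [h1] at hlook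
    rcases hA : aStep n tieR lh rh with ⟨c, lh', rh'⟩
    rw [hA] at hlook h2 h3
    simp only [solGo, runGo, hA, hlook, Option.getD_some]
    exact ih (ans ++ [c]) lh' rh' (fun m hm => hpre m (List.mem_cons_of_mem _ hm)) h2 h3

-- ===== VERDICT (by name: the statement is the Claim_ definition above) =====
theorem solution_spec : Claim_equal_solution := by
  intro numbers hand _ hpre
  unfold Spec_solution solution solution_alt
  rw [go_eq (hand == "right") (buildTrans (hand == "right"))
        (fun d hd lh hl rh hr => get?_build hl hr hd)
        numbers [] PadKey.star PadKey.hash hpre (by decide) (by decide)]
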